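-- pv_equiv track=rewrite | github.com/trister95/dbnl_bear | dbnl_bear/overview.py | map_to_original_index
-- ===== SOURCE A (Python) =====
-- def map_to_original_index(original_text, alphanumeric_index):
--     alphanumeric_count = 0
--     for i, char in enumerate(original_text):
--         if char.isalnum():
--             if alphanumeric_count == alphanumeric_index:
--                 return i
--             alphanumeric_count += 1
--     return len(original_text)
-- ===== SOURCE B (Python) =====
-- def map_to_original_index(original_text, alphanumeric_index):
--     positions = [i for i, c in enumerate(original_text) if c.isalnum()]
--     if 0 <= alphanumeric_index < len(positions):
--         return positions[alphanumeric_index]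
--     return len(original_text)
-- ===== Notes on version B (the rewrite author's own statement) =====
-- stated objective: simpler
-- what changed: Replaces the interleaved counter-with-early-return scan with an index table built by one comprehension plus a guarded direct lookup.
import Mathlib
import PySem

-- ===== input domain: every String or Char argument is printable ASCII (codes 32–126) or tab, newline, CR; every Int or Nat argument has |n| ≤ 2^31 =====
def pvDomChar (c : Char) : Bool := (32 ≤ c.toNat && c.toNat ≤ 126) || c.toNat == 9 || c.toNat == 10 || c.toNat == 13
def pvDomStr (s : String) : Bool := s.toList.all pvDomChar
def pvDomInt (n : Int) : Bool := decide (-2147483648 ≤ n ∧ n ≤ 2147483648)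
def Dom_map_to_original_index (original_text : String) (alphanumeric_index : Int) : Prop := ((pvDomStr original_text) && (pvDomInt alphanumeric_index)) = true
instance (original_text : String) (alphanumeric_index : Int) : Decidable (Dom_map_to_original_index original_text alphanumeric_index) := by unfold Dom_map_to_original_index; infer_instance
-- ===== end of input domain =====

-- B builds the list of alphanumeric positions once and looks the index up with a range
-- guard, instead of A's counter-with-early-return scan; objective: simpler.
-- ===== PORT A =====
def pvA_loop : List (Int × Char) → Int → Int → Option Int
  | [], _, _ => none
  | (i, c) :: rest, cnt, idx =>
    if PySem.Chars.isalnum c then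
      if cnt = idx then some i else pvA_loop rest (cnt + 1) idx
    else pvA_loop rest cnt idx

def map_to_original_index (original_text : String) (alphanumeric_index : Int) : Int :=
  (pvA_loop (PySem.List.enumerate original_text.toList) 0 alphanumeric_index).getD
    (PySem.Str.len original_text)

-- ===== PORT B =====
def map_to_original_index_alt (original_text : String) (alphanumeric_index : Int) : Int :=
  let positions : List Int :=
    ((PySem.List.enumerate original_text.toList).filter
      (fun p => PySem.Chars.isalnum p.2)).map (fun p => p.1)
  if 0 ≤ alphanumeric_index ∧ alphanumeric_index < (positions.length : Int) then
    (PySem.List.pyGet? positions alphanumeric_index).getD 0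
  else PySem.Str.len original_text

-- ===== PRECONDITION & SPEC =====
def Spec_map_to_original_index (original_text : String) (alphanumeric_index : Int) (out : Int) : Prop := out = map_to_original_index_alt original_text alphanumeric_index
instance (original_text : String) (alphanumeric_index : Int) (out : Int) : Decidable (Spec_map_to_original_index original_text alphanumeric_index out) := by unfold Spec_map_to_original_index; infer_instance

-- ===== CLAIM (what is proved, stated in full; the proofs are below) =====
def Claim_equal_map_to_original_index : Prop := ∀ (original_text : String) (alphanumeric_index : Int), Dom_map_to_original_index original_text alphanumeric_index → Spec_map_to_original_index original_text alphanumeric_index (map_to_original_index original_text alphanumeric_index)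

-- ===== LEMMAS AND PROOFS =====
-- ===== VERDICT (by name: the statement is the Claim_ definition above) =====
-- positions of l = what B's comprehension computes on suffix l
def pvPos (l : List (Int × Char)) : List Int :=
  (l.filter (fun p => PySem.Chars.isalnum p.2)).map (fun p => p.1)

theorem pvA_loop_eq (l : List (Int × Char)) (cnt idx : Int) :
    pvA_loop l cnt idx =
      if cnt ≤ idx ∧ idx - cnt < ((pvPos l).length : Int)
      then (pvPos l)[(idx - cnt).toNat]?
      else none := by
  induction l generalizing cnt with
  | nil => simp [pvA_loop, pvPos]
  | cons hd tl ih =>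
    obtain ⟨i, c⟩ := hd
    by_cases ha : PySem.Chars.isalnum c
    · by_cases he : cnt = idx
      · subst he
        simp [pvA_loop, pvPos, ha]
      · have : pvPos ((i, c) :: tl) = i :: pvPos tl := by simp [pvPos, ha]
        rw [this]
        simp only [pvA_loop, if_pos ha, if_neg he, ih]
        by_cases h1 : cnt + 1 ≤ idx ∧ idx - (cnt + 1) < ((pvPos tl).length : Int)
        · have hl : ((i :: pvPos tl).length : Int) = ((pvPos tl).length : Int) + 1 := by
            simp
          rw [if_pos h1, if_pos (by omega : cnt ≤ idx ∧ idx - cnt < (((i :: pvPos tl).length : Nat) : Int))]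
          have h2 : (idx - cnt).toNat = (idx - (cnt + 1)).toNat + 1 := by omega
          simp [h2]
        · have hl : ((i :: pvPos tl).length : Int) = ((pvPos tl).length : Int) + 1 := by
            simp
          rw [if_neg h1, if_neg (by omega)]
    · have : pvPos ((i, c) :: tl) = pvPos tl := by simp [pvPos, ha]
      rw [this]
      simp only [pvA_loop, if_neg ha, ih]

-- ===== VERDICT (by name: the statement is the Claim_ definition above) =====
theorem map_to_original_index_spec : Claim_equal_map_to_original_index := by
  intro s idx _
  unfold Spec_map_to_original_index map_to_original_index map_to_original_index_alt
  rw [pvA_loop_eq]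
  rw [show (((PySem.List.enumerate s.toList).filter
      (fun p => PySem.Chars.isalnum p.2)).map (fun p => p.1)) =
      pvPos (PySem.List.enumerate s.toList) from rfl]
  show _ = (if 0 ≤ idx ∧ idx < ((pvPos (PySem.List.enumerate s.toList)).length : Int) then _ else _)
  by_cases h : 0 ≤ idx ∧ idx < ((pvPos (PySem.List.enumerate s.toList)).length : Int)
  · rw [if_pos h, if_pos (by omega)]
    rw [PySem.List.pyGet?_of_nonneg _ h.1]
    have hlt : idx.toNat < (pvPos (PySem.List.enumerate s.toList)).length := by omega
    simp [List.getElem?_eq_getElem hlt]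
  · rw [if_neg h, if_neg (by omega)]
    simp
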